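-- pv_equiv track=rewrite | github.com/hyyc116/paper_diversity | src/data_process/abs_data.py | get_c2510_papers
-- ===== SOURCE A (Python) =====
-- def get_c2510_papers(start_year,year_cits):
--     c2papers = []
--     c5papers = []
--     c10papers = []
--
--     for i in range(11):
--
--         if i<=2:
--             c2papers.extend(year_cits.get(start_year+i, []))
--
--         if i<=5:
--             c5papers.extend(year_cits.get(start_year+i, []))
--
--         if i <= 10:
--             c10papers.extend(year_cits.get(start_year+i, []))
--
--     return c2papers,c5papers,c10papers
-- ===== SOURCE B (Python) =====
-- def get_c2510_papers(start_year, year_cits):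
--     # Single accumulator extended once per year, snapshotted at the 2- and 5-year boundaries.
--     acc = []
--     c2papers = c5papers = []
--     for i in range(11):
--         acc.extend(year_cits.get(start_year + i, []))
--         if i == 2:
--             c2papers = list(acc)
--         elif i == 5:
--             c5papers = list(acc)
--     return c2papers, c5papers, acc
-- ===== Notes on version B (the rewrite author's own statement) =====
-- stated objective: simpler
-- what changed: Replaces three independently-extended lists with three conditional extends per iteration by one accumulator extended once per year, snapshotted at the 2- and 5-year window boundaries.
import Mathlib
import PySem

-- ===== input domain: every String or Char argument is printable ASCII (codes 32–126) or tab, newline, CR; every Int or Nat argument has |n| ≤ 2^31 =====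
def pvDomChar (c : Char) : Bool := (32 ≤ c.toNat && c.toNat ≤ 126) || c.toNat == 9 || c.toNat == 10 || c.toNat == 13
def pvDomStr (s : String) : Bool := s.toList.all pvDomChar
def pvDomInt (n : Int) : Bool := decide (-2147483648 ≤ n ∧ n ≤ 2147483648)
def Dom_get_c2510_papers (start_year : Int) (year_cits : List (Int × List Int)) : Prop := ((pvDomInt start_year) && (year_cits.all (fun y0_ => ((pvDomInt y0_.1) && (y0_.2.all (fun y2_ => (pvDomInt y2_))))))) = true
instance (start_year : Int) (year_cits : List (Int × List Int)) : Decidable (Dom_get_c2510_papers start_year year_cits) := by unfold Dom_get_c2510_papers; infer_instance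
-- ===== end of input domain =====

-- B extends one accumulator once per year and snapshots it at the 2- and 5-year boundaries,
-- instead of A's three independently-extended lists with three conditional extends per iteration (simpler).

-- ===== PORT A =====
-- for i in range(11): conditionally extend each of the three lists
def get_c2510_papers (start_year : Int) (year_cits : List (Int × List Int)) : List Int × List Int × List Int :=
  (PySem.List.pyRange 0 11 1).foldl
    (fun (st : List Int × List Int × List Int) i =>
      let st := if i ≤ 2 then (st.1 ++ PySem.Dict.getD (PySem.Dict.mk year_cits) (start_year + i) [], st.2.1, st.2.2) else st
      let st := if i ≤ 5 then (st.1, st.2.1 ++ PySem.Dict.getD (PySem.Dict.mk year_cits) (start_year + i) [], st.2.2) else st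
      let st := if i ≤ 10 then (st.1, st.2.1, st.2.2 ++ PySem.Dict.getD (PySem.Dict.mk year_cits) (start_year + i) []) else st
      st)
    ([], [], [])

-- ===== PORT B =====
-- one accumulator, snapshotted when i == 2 and i == 5
def get_c2510_papers_alt (start_year : Int) (year_cits : List (Int × List Int)) : List Int × List Int × List Int :=
  let st := (PySem.List.pyRange 0 11 1).foldl
    (fun (st : List Int × List Int × List Int) i =>
      let acc := st.1 ++ PySem.Dict.getD (PySem.Dict.mk year_cits) (start_year + i) []
      if i = 2 then (acc, acc, st.2.2)
      else if i = 5 then (acc, st.2.1, acc)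
      else (acc, st.2.1, st.2.2))
    ([], [], [])
  (st.2.1, st.2.2, st.1)

-- ===== PRECONDITION & SPEC =====
def Spec_get_c2510_papers (start_year : Int) (year_cits : List (Int × List Int)) (out : List Int × List Int × List Int) : Prop := out = get_c2510_papers_alt start_year year_cits
instance (start_year : Int) (year_cits : List (Int × List Int)) (out : List Int × List Int × List Int) : Decidable (Spec_get_c2510_papers start_year year_cits out) := by unfold Spec_get_c2510_papers; infer_instance

-- ===== CLAIM (what is proved, stated in full; the proofs are below) =====
def Claim_equal_get_c2510_papers : Prop := ∀ (start_year : Int) (year_cits : List (Int × List Int)), Dom_get_c2510_papers start_year year_cits → Spec_get_c2510_papers start_year year_cits (get_c2510_papers start_year year_cits)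

-- ===== LEMMAS AND PROOFS =====

-- ===== VERDICT (by name: the statement is the Claim_ definition above) =====
theorem get_c2510_papers_spec : Claim_equal_get_c2510_papers := by
  intro start_year year_cits _
  unfold Spec_get_c2510_papers get_c2510_papers get_c2510_papers_alt
  simp [PySem.List.pyRange, List.range_succ, List.append_assoc]
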